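-- pv_equiv track=rewrite | github.com/hwu8830/python_homework | day05作业/01.py | get_cal
-- ===== SOURCE A (Python) =====
-- def get_cal(number):
--     zero = 0
--     one = 0
--     while number>0:
--         i = number%2 #余数
--         j = number//2 #商
--         if i == 0:
--             zero +=1
--         elif i==1:
--             one +=1
--         elif j == 1:
--             one += 1
--         number = j
--     return zero,one
-- ===== SOURCE B (Python) =====
-- def get_cal(number):
--     if number > 0:
--         s = bin(number)[2:]
--         return s.count('0'), s.count('1')
--     return 0, 0
-- ===== Notes on version B (the rewrite author's own statement) =====
-- stated objective: idiomatic
-- what changed: Replaces the remainder/quotient accumulator loop with building the binary string representation once and counting '0'/'1' characters with str.count.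
import Mathlib
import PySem

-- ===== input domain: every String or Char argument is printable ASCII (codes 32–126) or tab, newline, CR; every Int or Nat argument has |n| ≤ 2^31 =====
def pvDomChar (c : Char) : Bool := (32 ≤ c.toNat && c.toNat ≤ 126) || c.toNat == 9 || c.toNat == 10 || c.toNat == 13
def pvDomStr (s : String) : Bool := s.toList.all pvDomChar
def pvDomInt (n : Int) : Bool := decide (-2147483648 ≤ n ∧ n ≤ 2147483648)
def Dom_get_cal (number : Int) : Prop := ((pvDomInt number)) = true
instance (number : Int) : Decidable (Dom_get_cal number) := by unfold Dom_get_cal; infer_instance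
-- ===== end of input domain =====

-- B replaces A's remainder/quotient accumulator loop by building the binary digit string once
-- and counting '0'/'1' characters (idiomatic; same cost).

-- ===== PORT A =====
-- while number>0 loop carrying (zero, one)
def pvLoopA (number zero one : Int) : Int × Int :=
  if h : number > 0 then
    let i := PySem.Int.mod number 2
    let j := PySem.Int.floordiv number 2
    let p : Int × Int :=
      if i = 0 then (zero + 1, one)
      else if i = 1 then (zero, one + 1)
      else if j = 1 then (zero, one + 1)
      else (zero, one)
    pvLoopA j p.1 p.2
  else (zero, one)
termination_by number.toNat
decreasing_by
  have := PySem.Int.floordiv_eq_ediv_of_pos (a := number) (b := 2) (by omega)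
  simp only [this]; omega

def get_cal (number : Int) : Int × Int := pvLoopA number 0 0

-- ===== PORT B =====
-- pvBits n = bin(n)[2:] as a list of chars (empty for n = 0)
def pvBits (n : Nat) : List Char :=
  if _h : n = 0 then []
  else pvBits (n / 2) ++ [if n % 2 = 1 then '1' else '0']

def get_cal_alt (number : Int) : Int × Int :=
  if number > 0 then
    let s := pvBits number.toNat
    (((s.count '0' : Nat) : Int), ((s.count '1' : Nat) : Int))
  else (0, 0)

-- ===== PRECONDITION & SPEC =====
def Spec_get_cal (number : Int) (out : Int × Int) : Prop := out = get_cal_alt number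
instance (number : Int) (out : Int × Int) : Decidable (Spec_get_cal number out) := by unfold Spec_get_cal; infer_instance

-- ===== CLAIM (what is proved, stated in full; the proofs are below) =====
def Claim_equal_get_cal : Prop := ∀ (number : Int), Dom_get_cal number → Spec_get_cal number (get_cal number)

-- ===== LEMMAS AND PROOFS =====

theorem pvLoopA_nat (n : Nat) : ∀ (z o : Int),
    pvLoopA (n : Int) z o =
      (z + ((pvBits n).count '0' : Nat), o + ((pvBits n).count '1' : Nat)) := by
  induction n using Nat.strong_induction_on with
  | _ n ih =>
    intro z o
    by_cases h0 : n = 0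
    · subst h0
      rw [pvLoopA, pvBits]
      simp
    · have hpos : (0 : Int) < (n : Int) := by exact_mod_cast Nat.pos_of_ne_zero h0
      rw [pvLoopA]
      simp only [hpos, dif_pos]
      have hmod : PySem.Int.mod (n : Int) 2 = ((n % 2 : Nat) : Int) := by
        exact_mod_cast PySem.Int.mod_natCast n 2
      have hdiv : PySem.Int.floordiv (n : Int) 2 = ((n / 2 : Nat) : Int) := by
        exact_mod_cast PySem.Int.floordiv_natCast n 2
      rw [hmod, hdiv]
      rw [pvBits]
      simp only [dif_neg h0]
      rcases Nat.mod_two_eq_zero_or_one n with hm | hm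
      · simp only [hm, Nat.cast_zero]
        simp only [if_true]
        rw [ih (n / 2) (by omega)]
        simp [List.count_append]
        omega
      · simp only [hm, Nat.cast_one]
        simp only [if_true]
        rw [ih (n / 2) (by omega)]
        simp [List.count_append, hm]
        omega

-- ===== VERDICT (by name: the statement is the Claim_ definition above) =====
theorem get_cal_spec : Claim_equal_get_cal := by
  intro number _
  unfold Spec_get_cal get_cal get_cal_alt
  by_cases h : number > 0
  · have hn : number = ((number.toNat : Nat) : Int) := by omega
    rw [if_pos h]
    calc pvLoopA number 0 0 = pvLoopA ((number.toNat : Nat) : Int) 0 0 := by rw [← hn]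
      _ = _ := by rw [pvLoopA_nat]; simp
  · rw [if_neg h, pvLoopA, dif_neg h]
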